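-- pv_equiv track=rewrite | github.com/karthikrangasai/code-mixing-dravidian-languages | code_mixing_dravidian_languages/src/finetuning.py | _get_layer_splits
-- ===== SOURCE A (Python) =====
-- from itertools import accumulate
-- from typing import List, Optional, Tuple, Union
--
-- def _get_layer_splits(num_layers, num_epochs) -> List[Tuple[int, int]]:
--     layer_splits = []
--     rem = num_layers % num_epochs
--     layer_splits += [(num_layers // num_epochs) + 1] * rem
--     layer_splits += [(num_layers // num_epochs)] * (num_epochs-rem)
--     layer_splits = list(accumulate(layer_splits))
--     layer_splits = [0] + layer_splits
--     layer_splits = [(layer_splits[i], layer_splits[i+1]) for i in range(0, len(layer_splits)-1)]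
--     return layer_splits
-- ===== SOURCE B (Python) =====
-- def _get_layer_splits(num_layers, num_epochs):
--     base = num_layers // num_epochs
--     rem = num_layers % num_epochs
--     return [(base * i + min(i, rem), base * (i + 1) + min(i + 1, rem))
--             for i in range(num_epochs)]
-- ===== Notes on version B (the rewrite author's own statement) =====
-- stated objective: simpler
-- what changed: Replaces the sizes-list / accumulate / prepend-0 / pairwise-indexing pipeline with a single comprehension computing each boundary pair in closed form: boundary after i chunks is base*i + min(i, rem).
import Mathlib
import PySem

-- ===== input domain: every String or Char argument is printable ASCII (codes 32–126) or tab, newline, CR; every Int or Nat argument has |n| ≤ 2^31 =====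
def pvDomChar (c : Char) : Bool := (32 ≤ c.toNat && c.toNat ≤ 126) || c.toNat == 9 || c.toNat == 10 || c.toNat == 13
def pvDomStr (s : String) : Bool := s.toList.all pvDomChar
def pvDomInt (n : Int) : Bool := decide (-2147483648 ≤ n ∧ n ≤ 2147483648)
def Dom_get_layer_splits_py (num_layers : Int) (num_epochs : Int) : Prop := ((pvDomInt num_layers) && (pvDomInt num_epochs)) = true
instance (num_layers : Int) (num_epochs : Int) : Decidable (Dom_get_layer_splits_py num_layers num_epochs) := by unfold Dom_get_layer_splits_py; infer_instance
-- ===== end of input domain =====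

-- B replaces A's sizes-list/accumulate/prepend-0/pairwise pipeline by a closed-form
-- comprehension for each boundary pair (objective: simpler).


-- ===== PORT A =====
-- itertools.accumulate with running sum s (Python default start: s = 0 at the call site)
def pvAccumulate : List Int → Int → List Int
  | [], _ => []
  | x :: xs, s => (s + x) :: pvAccumulate xs (s + x)

def get_layer_splits_py (num_layers : Int) (num_epochs : Int) : List (Int × Int) :=
  let rem := PySem.Int.mod num_layers num_epochs
  let q := PySem.Int.floordiv num_layers num_epochs
  -- layer_splits = [] ; += [q+1]*rem ; += [q]*(num_epochs-rem)   ([x]*k is empty for k ≤ 0)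
  let sizes := List.replicate rem.toNat (q + 1) ++ List.replicate (num_epochs - rem).toNat q
  -- layer_splits = [0] + list(accumulate(layer_splits))
  let ls := 0 :: pvAccumulate sizes 0
  -- [(ls[i], ls[i+1]) for i in range(0, len(ls)-1)]  (indices are in range)
  (List.range (ls.length - 1)).map (fun i => (ls.getD i 0, ls.getD (i + 1) 0))

-- ===== PORT B =====
def get_layer_splits_py_alt (num_layers : Int) (num_epochs : Int) : List (Int × Int) :=
  let base := PySem.Int.floordiv num_layers num_epochs
  let rem := PySem.Int.mod num_layers num_epochs
  (PySem.List.pyRange 0 num_epochs 1).map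
    (fun i => (base * i + min i rem, base * (i + 1) + min (i + 1) rem))

-- ===== PRECONDITION & SPEC =====
-- Python raises ZeroDivisionError on num_epochs == 0 (both A and B compute // and %).
def Pre_get_layer_splits_py (num_layers : Int) (num_epochs : Int) : Prop := num_epochs ≠ 0
instance (num_layers : Int) (num_epochs : Int) : Decidable (Pre_get_layer_splits_py num_layers num_epochs) := by unfold Pre_get_layer_splits_py; infer_instance
def pvWitness_get_layer_splits_py : Int × Int := (10, 3)

def Spec_get_layer_splits_py (num_layers : Int) (num_epochs : Int) (out : List (Int × Int)) : Prop := out = get_layer_splits_py_alt num_layers num_epochs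
instance (num_layers : Int) (num_epochs : Int) (out : List (Int × Int)) : Decidable (Spec_get_layer_splits_py num_layers num_epochs out) := by unfold Spec_get_layer_splits_py; infer_instance

-- ===== CLAIM (what is proved, stated in full; the proofs are below) =====
def Claim_equal_get_layer_splits_py : Prop := ∀ (num_layers : Int) (num_epochs : Int), Dom_get_layer_splits_py num_layers num_epochs → Pre_get_layer_splits_py num_layers num_epochs → Spec_get_layer_splits_py num_layers num_epochs (get_layer_splits_py num_layers num_epochs)

-- ===== LEMMAS AND PROOFS =====

-- accumulate as prefix sums
lemma pvAccumulate_eq (xs : List Int) (s : Int) :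
    pvAccumulate xs s = (List.range xs.length).map (fun j => s + (xs.take (j + 1)).sum) := by
  induction xs generalizing s with
  | nil => simp [pvAccumulate]
  | cons x t ih =>
    simp [pvAccumulate, ih (s + x), List.range_succ_eq_map, List.map_map, Function.comp,
      add_assoc]

-- sum of a prefix of the sizes list, in closed form
lemma pvTakeSum (b : Int) (r n j : ℕ) (hr : r ≤ n) (hj : j ≤ n) :
    ((List.replicate r (b + 1) ++ List.replicate (n - r) b).take j).sum
      = b * (j : Int) + ((min j r : ℕ) : Int) := by
  rw [List.take_append, List.take_replicate, List.take_replicate,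
    List.sum_append, List.sum_replicate, List.sum_replicate, List.length_replicate]
  by_cases hjr : j ≤ r
  · have h1 : min j r = j := by omega
    have h2 : min (j - r) (n - r) = 0 := by omega
    rw [h1, h2]
    simp
    ring
  · have h1 : min j r = r := by omega
    have h2 : min (j - r) (n - r) = j - r := by omega
    rw [h1, h2]
    simp only [nsmul_eq_mul]
    have : ((j - r : ℕ) : Int) = (j : Int) - (r : Int) := by omega
    rw [this]
    ring

theorem get_layer_splits_py_eq (num_layers num_epochs : Int) (h : num_epochs ≠ 0) :
    get_layer_splits_py num_layers num_epochs = get_layer_splits_py_alt num_layers num_epochs := by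
  rcases lt_or_gt_of_ne h with hneg | hpos
  · -- num_epochs < 0 : both sides are []
    have hb := PySem.Int.mod_neg_bounds (a := num_layers) hneg
    simp only [get_layer_splits_py, get_layer_splits_py_alt]
    rw [PySem.List.pyRange_one_eq_nil (by omega)]
    have h1 : (PySem.Int.mod num_layers num_epochs).toNat = 0 := by omega
    have h2 : (num_epochs - PySem.Int.mod num_layers num_epochs).toNat = 0 := by omega
    simp [h1, h2, pvAccumulate]
  · -- num_epochs > 0
    have hrem0 : 0 ≤ PySem.Int.mod num_layers num_epochs := PySem.Int.mod_nonneg _ hpos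
    have hremlt : PySem.Int.mod num_layers num_epochs < num_epochs := PySem.Int.mod_lt _ hpos
    set b := PySem.Int.floordiv num_layers num_epochs with hbdef
    set rem := PySem.Int.mod num_layers num_epochs with hremdef
    set n := num_epochs.toNat with hndef
    set r := rem.toNat with hrdef
    have hne : num_epochs = (n : Int) := by omega
    have hre : rem = (r : Int) := by omega
    have hrn : r ≤ n := by omega
    have hsub : (num_epochs - rem).toNat = n - r := by omega
    simp only [get_layer_splits_py, get_layer_splits_py_alt]
    rw [← hbdef, ← hremdef, hsub, ← hrdef]
    set sizes := List.replicate r (b + 1) ++ List.replicate (n - r) b with hsdef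
    have hslen : sizes.length = n := by simp [hsdef]; omega
    have hls : (0 :: pvAccumulate sizes 0) = (List.range (n + 1)).map (fun j => (sizes.take j).sum) := by
      rw [pvAccumulate_eq, hslen, List.range_succ_eq_map, List.map_cons, List.map_map]
      simp [Function.comp]
    rw [hls]
    have hlen : ((List.range (n + 1)).map (fun j => (sizes.take j).sum)).length - 1 = n := by simp
    rw [hlen, hne, PySem.List.pyRange_one]
    simp only [sub_zero, Int.toNat_natCast, zero_add, List.map_map]
    apply List.map_congr_left
    intro i hi
    have hin : i < n := List.mem_range.mp hi
    have hget : ∀ j, j < n + 1 →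
        ((List.range (n + 1)).map (fun j => (sizes.take j).sum)).getD j 0 = (sizes.take j).sum := by
      intro j hj
      rw [List.getD_eq_getElem _ _ (by simpa using hj)]
      simp
    rw [hget i (by omega), hget (i + 1) (by omega), hsdef,
      pvTakeSum b r n i hrn (by omega), pvTakeSum b r n (i + 1) hrn (by omega)]
    have hmin1 : ((min i r : ℕ) : Int) = min (i : Int) rem := by rw [hre]; push_cast; rfl
    have hmin2 : ((min (i + 1) r : ℕ) : Int) = min ((i : Int) + 1) rem := by
      rw [hre]; push_cast; rfl
    simp [Function.comp, hmin1, hmin2]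

-- ===== VERDICT (by name: the statement is the Claim_ definition above) =====
theorem get_layer_splits_py_spec : Claim_equal_get_layer_splits_py := by
  intro num_layers num_epochs _ hpre
  unfold Spec_get_layer_splits_py
  exact get_layer_splits_py_eq num_layers num_epochs hpre
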